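-- pv_equiv track=rewrite | github.com/Thomasliminator/launch_scheduler | launch.py | single_day
-- ===== SOURCE A (Python) =====
-- def single_day(single_comb):
--     add = True
--     for i in range (2, 30):
--         count = 0
--         for j in single_comb:
--             if j[1] == i and count >= 1:
--                 add = False
--                 break
--             elif j[1] == i and count == 0:
--                 count += 1
--         if add == False:
--             break
--     return add
-- ===== SOURCE B (Python) =====
-- def single_day(single_comb):
--     seen = set()
--     for j in single_comb:
--         v = j[1]
--         if 2 <= v <= 29 and v in seen:
--             return False
--         seen.add(v)
--     return True
-- ===== Notes on version B (the rewrite author's own statement) =====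
-- stated objective: faster
-- what changed: Replaces the 28 full rescans of the list (one per candidate value 2..29) with a single pass that maintains a set of already-seen second components, returning False on the first in-range repeat.
import Mathlib
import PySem

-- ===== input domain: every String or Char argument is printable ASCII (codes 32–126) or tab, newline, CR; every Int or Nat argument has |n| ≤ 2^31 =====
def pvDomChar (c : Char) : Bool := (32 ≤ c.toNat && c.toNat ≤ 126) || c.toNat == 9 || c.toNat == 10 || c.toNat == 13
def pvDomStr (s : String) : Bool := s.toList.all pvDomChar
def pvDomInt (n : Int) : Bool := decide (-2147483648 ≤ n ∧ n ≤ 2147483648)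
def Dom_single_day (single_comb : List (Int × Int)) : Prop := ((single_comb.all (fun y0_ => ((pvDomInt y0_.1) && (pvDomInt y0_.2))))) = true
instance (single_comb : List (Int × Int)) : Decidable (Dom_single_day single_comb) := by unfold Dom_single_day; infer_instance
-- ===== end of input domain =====

-- B makes one pass with a seen-set instead of A's 28 rescans of the list (one per candidate value).

-- ===== PORT A =====
-- inner 'for j in single_comb' loop of A, for a fixed i, with the running count
def pvInnerA (i : Int) : List (Int × Int) → Int → Bool
  | [], _ => true
  | j :: rest, count =>
    if j.2 = i ∧ 1 ≤ count then false
    else if j.2 = i ∧ count = 0 then pvInnerA i rest (count + 1)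
    else pvInnerA i rest count

-- outer 'for i in range(2, 30)' loop of A (add == False breaks out)
def pvOuterA (single_comb : List (Int × Int)) : List Int → Bool
  | [] => true
  | i :: rest => if pvInnerA i single_comb 0 then pvOuterA single_comb rest else false

def single_day (single_comb : List (Int × Int)) : Bool :=
  pvOuterA single_comb (PySem.List.pyRange 2 30 1)

-- ===== PORT B =====
-- single pass of B, carrying the seen set of second components
def pvLoopB : List (Int × Int) → PySem.Set Int → Bool
  | [], _ => true
  | j :: rest, seen =>
    if 2 ≤ j.2 ∧ j.2 ≤ 29 ∧ PySem.Set.contains seen j.2 then false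
    else pvLoopB rest (PySem.Set.add seen j.2)

def single_day_alt (single_comb : List (Int × Int)) : Bool :=
  pvLoopB single_comb PySem.Set.empty

-- ===== PRECONDITION & SPEC =====
def Spec_single_day (single_comb : List (Int × Int)) (out : Bool) : Prop := out = single_day_alt single_comb
instance (single_comb : List (Int × Int)) (out : Bool) : Decidable (Spec_single_day single_comb out) := by unfold Spec_single_day; infer_instance

-- ===== CLAIM (what is proved, stated in full; the proofs are below) =====
def Claim_equal_single_day : Prop := ∀ (single_comb : List (Int × Int)), Dom_single_day single_comb → Spec_single_day single_comb (single_day single_comb)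

-- ===== LEMMAS AND PROOFS =====

-- number of elements of l whose second component is v
def pvCnt (v : Int) (l : List (Int × Int)) : Nat := l.countP (fun j => j.2 = v)

theorem pvCnt_cons (v : Int) (j : Int × Int) (l : List (Int × Int)) :
    pvCnt v (j :: l) = pvCnt v l + (if j.2 = v then 1 else 0) := by
  simp [pvCnt, List.countP_cons]

-- A's inner loop returns true iff i does not occur "twice" (counting the seed count)
theorem pvInnerA_true_iff (i : Int) (l : List (Int × Int)) :
    ∀ c : Int, c = 0 ∨ c = 1 →
      (pvInnerA i l c = true ↔ pvCnt i l + (if c = 1 then 1 else 0) ≤ 1) := by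
  induction l with
  | nil =>
    intro c hc
    simp [pvInnerA, pvCnt]
    rcases hc with h | h <;> simp [h]
  | cons j rest ih =>
    intro c hc
    rcases hc with h | h <;> subst h
    · by_cases hj : j.2 = i
      · have := ih 1 (Or.inr rfl)
        simp [pvInnerA, hj, pvCnt_cons, this]
      · have := ih 0 (Or.inl rfl)
        simp [pvInnerA, hj, pvCnt_cons, this]
    · by_cases hj : j.2 = i
      · simp [pvInnerA, hj, pvCnt_cons]
      · have := ih 1 (Or.inr rfl)
        simp [pvInnerA, hj, pvCnt_cons, this]

-- A's outer loop returns true iff the inner loop succeeds for every candidate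
theorem pvOuterA_true_iff (l : List (Int × Int)) (is : List Int) :
    pvOuterA l is = true ↔ ∀ i ∈ is, pvInnerA i l 0 = true := by
  induction is with
  | nil => simp [pvOuterA]
  | cons i rest ih =>
    by_cases h : pvInnerA i l 0 = true
    · simp [pvOuterA, h, ih]
    · simp [pvOuterA, h]

-- B's loop returns true iff no value in 2..29 is seen twice (counting the seed set)
theorem pvLoopB_true_iff (l : List (Int × Int)) :
    ∀ seen : PySem.Set Int,
      (pvLoopB l seen = true ↔
        ∀ v : Int, 2 ≤ v → v ≤ 29 →
          pvCnt v l + (if v ∈ seen then 1 else 0) ≤ 1) := by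
  induction l with
  | nil =>
    intro seen
    simp [pvLoopB, pvCnt]
    intro v _ _
    split <;> simp
  | cons j rest ih =>
    intro seen
    by_cases hg : 2 ≤ j.2 ∧ j.2 ≤ 29 ∧ PySem.Set.contains seen j.2
    · simp only [pvLoopB, if_pos hg]
      constructor
      · intro h; cases h
      · intro h
        exfalso
        have hm : j.2 ∈ seen := by
          have := hg.2.2
          simpa [PySem.Set.contains_iff] using this
        have := h j.2 hg.1 hg.2.1
        simp [pvCnt_cons, hm] at this
    · simp only [pvLoopB, if_neg hg]
      rw [ih (PySem.Set.add seen j.2)]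
      refine forall_congr' (fun v => ?_)
      refine imp_congr_right (fun h2 => imp_congr_right (fun h29 => ?_))
      have hkey : pvCnt v rest + (if v ∈ PySem.Set.add seen j.2 then 1 else 0)
          = pvCnt v (j :: rest) + (if v ∈ seen then 1 else 0) := by
        by_cases hv : v = j.2
        · have hns : v ∉ seen := by
            intro hm
            exact hg ⟨hv ▸ h2, hv ▸ h29, by
              rw [PySem.Set.contains_iff]; exact hv ▸ hm⟩
          simp [pvCnt_cons, hv.symm, hns]
        · simp [PySem.Set.mem_add, pvCnt_cons, hv, Ne.symm hv]
      rw [hkey]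

theorem single_day_eq_alt (l : List (Int × Int)) : single_day l = single_day_alt l := by
  have hA : single_day l = true ↔ ∀ v : Int, 2 ≤ v → v ≤ 29 → pvCnt v l ≤ 1 := by
    unfold single_day
    rw [pvOuterA_true_iff]
    constructor
    · intro h v h2 h29
      have := (pvInnerA_true_iff v l 0 (Or.inl rfl)).mp
        (h v (by rw [PySem.List.mem_pyRange_one]; omega))
      simpa using this
    · intro h i hi
      rw [PySem.List.mem_pyRange_one] at hi
      exact (pvInnerA_true_iff i l 0 (Or.inl rfl)).mpr (by simpa using h i hi.1 (by omega))
  have hB : single_day_alt l = true ↔ ∀ v : Int, 2 ≤ v → v ≤ 29 → pvCnt v l ≤ 1 := by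
    unfold single_day_alt
    rw [pvLoopB_true_iff l PySem.Set.empty]
    simp [PySem.Set.empty]
  cases hA' : single_day l
  · cases hB' : single_day_alt l
    · rfl
    · exact absurd (hA.mpr (hB.mp hB')) (by simp [hA'])
  · exact (hB.mpr (hA.mp hA')).symm

-- ===== VERDICT (by name: the statement is the Claim_ definition above) =====
theorem single_day_spec : Claim_equal_single_day := by
  intro l _
  exact single_day_eq_alt l
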